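-- pv_equiv track=rewrite | github.com/demeet2k/athena-square-earth | DEEPER_CRYSTALIZATION/chapter_frontier_compiler.py | witness_obligations
-- ===== SOURCE A (Python) =====
-- from collections import defaultdict
--
-- def witness_obligations(open_cells: list[dict], duplicate_groups: list[dict], chapter_code: str) -> list[str]:
--     obligations = []
--     if duplicate_groups:
--         obligations.append("Collapse duplicate source families into one canonical witness before final closure claims are promoted.")
--     grouped_open = defaultdict(list)
--     for cell in open_cells:
--         grouped_open[cell["lens"]].append(cell)
--     for lens, cells in sorted(grouped_open.items()):
--         obligations.append(
--             f"Lens {lens}: supply direct witnesses for {', '.join(cell['title'] for cell in cells[:4])} before claiming the {chapter_code} crystal is fully closed."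
--         )
--     if not obligations:
--         obligations.append("All current cells have candidate local witnesses; remaining work is promotion, ordering, and proof tightening.")
--     return obligations
-- ===== SOURCE B (Python) =====
-- def witness_obligations(open_cells: list[dict], duplicate_groups: list[dict], chapter_code: str) -> list[str]:
--     obligations = []
--     if duplicate_groups:
--         obligations.append("Collapse duplicate source families into one canonical witness before final closure claims are promoted.")
--
--     def line(run):
--         titles = ", ".join(cell["title"] for cell in run[:4])
--         return f"Lens {run[0]['lens']}: supply direct witnesses for {titles} before claiming the {chapter_code} crystal is fully closed."
--
--     # Stable sort by lens, then one pass emitting an obligation per run of equal lenses.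
--     run = []
--     for cell in sorted(open_cells, key=lambda c: c["lens"]):
--         if run and run[-1]["lens"] != cell["lens"]:
--             obligations.append(line(run))
--             run = []
--         run.append(cell)
--     if run:
--         obligations.append(line(run))
--
--     if not obligations:
--         obligations.append("All current cells have candidate local witnesses; remaining work is promotion, ordering, and proof tightening.")
--     return obligations
-- ===== Notes on version B (the rewrite author's own statement) =====
-- stated objective: alternative
-- what changed: B drops A's defaultdict grouping entirely: it stably sorts the cells by lens and emits one obligation per run of equal lenses in a single pass with a (obligations, current_run) accumulator, instead of building a dict of lists and sorting its items.
import Mathlib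
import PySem

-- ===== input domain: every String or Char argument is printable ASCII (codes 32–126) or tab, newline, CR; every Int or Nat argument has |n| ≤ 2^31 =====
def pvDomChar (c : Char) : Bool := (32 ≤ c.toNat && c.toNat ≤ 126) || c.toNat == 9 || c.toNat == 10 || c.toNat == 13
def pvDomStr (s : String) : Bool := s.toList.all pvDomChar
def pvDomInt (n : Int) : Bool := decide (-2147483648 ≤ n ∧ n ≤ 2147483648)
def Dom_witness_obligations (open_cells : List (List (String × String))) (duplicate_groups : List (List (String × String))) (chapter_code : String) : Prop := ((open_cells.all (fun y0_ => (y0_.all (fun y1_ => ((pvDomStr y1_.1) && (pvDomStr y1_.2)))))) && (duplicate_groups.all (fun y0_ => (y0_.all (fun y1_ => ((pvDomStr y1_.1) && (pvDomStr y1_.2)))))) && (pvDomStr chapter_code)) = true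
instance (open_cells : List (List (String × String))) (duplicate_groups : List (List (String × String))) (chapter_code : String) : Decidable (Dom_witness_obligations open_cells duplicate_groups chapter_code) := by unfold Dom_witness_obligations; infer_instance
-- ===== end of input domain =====

-- B replaces A's defaultdict-then-sort-items grouping by a stable sort of the cells by lens
-- followed by a single run-detecting pass (objective: alternative decomposition, same cost).

-- shared helpers: the two message constants and the f-string line both Pythons build verbatim
def pvDupMsg : String := "Collapse duplicate source families into one canonical witness before final closure claims are promoted."
def pvEmptyMsg : String := "All current cells have candidate local witnesses; remaining work is promotion, ordering, and proof tightening."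

-- cell[k]: first-match lookup in the association list representing the Python dict;
-- the "" default is never reached on inputs admitted by Pre_witness_obligations
def pvCellGet (cell : List (String × String)) (k : String) : String :=
  (PySem.Dict.mk cell).getD k ""

-- the f-string "Lens {lens}: supply direct witnesses for {', '.join(...cells[:4]...)} ..."
def pvLine (lens : String) (cells : List (List (String × String))) (chapter_code : String) : String :=
  "Lens " ++ lens ++ ": supply direct witnesses for " ++
    PySem.Str.join ", " ((PySem.List.slice cells none (some 4)).map (fun c => pvCellGet c "title")) ++
    " before claiming the " ++ chapter_code ++ " crystal is fully closed."

-- ===== PORT A =====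
def witness_obligations (open_cells : List (List (String × String))) (duplicate_groups : List (List (String × String))) (chapter_code : String) : List String :=
  let obligations : List String := if duplicate_groups.isEmpty then [] else [pvDupMsg]
  let grouped : PySem.Dict String (List (List (String × String))) :=
    open_cells.foldl (fun d cell => d.modify (pvCellGet cell "lens") [] (fun v => v ++ [cell])) PySem.Dict.empty
  -- sorted(grouped_open.items()): the dict's keys are distinct, so Python's tuple sort
  -- never compares the second components and equals a sort by the key
  let obligations := obligations ++
    (PySem.List.sorted grouped.items (fun p => p.1)).map (fun p => pvLine p.1 p.2 chapter_code)
  if obligations.isEmpty then [pvEmptyMsg] else obligations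

-- ===== PORT B =====
-- line(run) of Source B: the lens is read from the first cell of the run
def pvLineRun (run : List (List (String × String))) (chapter_code : String) : String :=
  pvLine (pvCellGet (run.headD []) "lens") run chapter_code

-- one iteration of Source B's for-loop over the sorted cells: state = (obligations, run)
def pvStepB (chapter_code : String) (st : List String × List (List (String × String))) (cell : List (String × String)) : List String × List (List (String × String)) :=
  if st.2 ≠ [] ∧ pvCellGet (st.2.getLastD []) "lens" ≠ pvCellGet cell "lens" then
    (st.1 ++ [pvLineRun st.2 chapter_code], [cell])
  else (st.1, st.2 ++ [cell])

def witness_obligations_alt (open_cells : List (List (String × String))) (duplicate_groups : List (List (String × String))) (chapter_code : String) : List String :=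
  let obligations : List String := if duplicate_groups.isEmpty then [] else [pvDupMsg]
  let st := (PySem.List.sorted open_cells (fun c => pvCellGet c "lens")).foldl (pvStepB chapter_code) (obligations, [])
  let obligations := if st.2.isEmpty then st.1 else st.1 ++ [pvLineRun st.2 chapter_code]
  if obligations.isEmpty then [pvEmptyMsg] else obligations

-- ===== PRECONDITION & SPEC =====
-- Pre_ excludes exactly the inputs on which Python A raises KeyError: every open cell must
-- carry a "lens" key, and a "title" key whenever the cell is among the first four of its
-- lens group (titles of later cells of a group are never read, so they may be absent).
def Pre_witness_obligations (open_cells : List (List (String × String))) (duplicate_groups : List (List (String × String))) (chapter_code : String) : Prop :=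
  ∀ i ∈ List.range open_cells.length,
    (open_cells.getD i []).any (fun p => p.1 == "lens") = true ∧
    ((open_cells.take i).countP (fun c => pvCellGet c "lens" == pvCellGet (open_cells.getD i []) "lens") < 4 →
      (open_cells.getD i []).any (fun p => p.1 == "title") = true)
instance (open_cells : List (List (String × String))) (duplicate_groups : List (List (String × String))) (chapter_code : String) : Decidable (Pre_witness_obligations open_cells duplicate_groups chapter_code) := by unfold Pre_witness_obligations; infer_instance

def pvWitness_witness_obligations : (List (List (String × String))) × (List (List (String × String))) × String :=
  ([[("lens", "a"), ("title", "t1")], [("lens", "b"), ("title", "t2")]], [], "CH")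

def Spec_witness_obligations (open_cells : List (List (String × String))) (duplicate_groups : List (List (String × String))) (chapter_code : String) (out : List String) : Prop := out = witness_obligations_alt open_cells duplicate_groups chapter_code
instance (open_cells : List (List (String × String))) (duplicate_groups : List (List (String × String))) (chapter_code : String) (out : List String) : Decidable (Spec_witness_obligations open_cells duplicate_groups chapter_code out) := by unfold Spec_witness_obligations; infer_instance

-- ===== CLAIM (what is proved, stated in full; the proofs are below) =====
def Claim_equal_witness_obligations : Prop := ∀ (open_cells : List (List (String × String))) (duplicate_groups : List (List (String × String))) (chapter_code : String), Dom_witness_obligations open_cells duplicate_groups chapter_code → Pre_witness_obligations open_cells duplicate_groups chapter_code → Spec_witness_obligations open_cells duplicate_groups chapter_code (witness_obligations open_cells duplicate_groups chapter_code)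

-- ===== LEMMAS AND PROOFS =====

def pvKf (c : List (String × String)) : String := pvCellGet c "lens"
def pvF (oc : List (List (String × String))) (l : String) : List (List (String × String)) :=
  oc.filter (fun c => pvKf c == l)
def pvKs (oc : List (List (String × String))) : List String :=
  PySem.List.sorted (PySem.List.dedup (oc.map pvKf)) (fun x => x)

theorem pv_insertBy_append_not {α : Type} (bef : α → α → Bool) (x : α) (as bs : List α)
    (h : ∀ a ∈ as, bef x a = false) :
    PySem.List.insertBy bef x (as ++ bs) = as ++ PySem.List.insertBy bef x bs := by
  induction as with
  | nil => rfl
  | cons a t ih =>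
    have ih' := ih (fun a ha => h a (by simp [ha]))
    cases bs with
    | nil => simpa [PySem.List.insertBy, h a (by simp)] using congrArg (a :: ·) ih'
    | cons b bs' =>
      simp only [List.cons_append, PySem.List.insertBy, h a (by simp), Bool.false_eq_true, if_false]
      exact congrArg (a :: ·) ih'

theorem pv_insertBy_all_before {α : Type} (bef : α → α → Bool) (x : α) (bs : List α)
    (h : ∀ a ∈ bs, bef x a = true) :
    PySem.List.insertBy bef x bs = x :: bs := by
  cases bs with
  | nil => rfl
  | cons b t => simp [PySem.List.insertBy, h b (by simp)]

theorem pv_insertBy_flatMap_mem {α : Type} (kf : α → String) (x : α) (ks : List String)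
    (F : String → List α) (hks : ks.Pairwise (· < ·)) (hmem : kf x ∈ ks)
    (hne : ∀ l ∈ ks, F l ≠ []) (hkey : ∀ l ∈ ks, ∀ c ∈ F l, kf c = l) :
    PySem.List.insertBy (fun a b => decide (kf a < kf b)) x (ks.flatMap F)
      = ks.flatMap (fun l => F l ++ if kf x == l then [x] else []) := by
  induction ks with
  | nil => simp at hmem
  | cons l ks' ih =>
    have hpair := (List.pairwise_cons.mp hks)
    rcases eq_or_ne (kf x) l with hEq | hNe
    · have hfalse : ∀ a ∈ F l, (fun a b => decide (kf a < kf b)) x a = false := by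
        intro a ha
        show decide (kf x < kf a) = false
        rw [hkey l (by simp) a ha, hEq]
        exact decide_eq_false (lt_irrefl l)
      have htrue : ∀ a ∈ ks'.flatMap F, (fun a b => decide (kf a < kf b)) x a = true := by
        intro a ha
        rcases List.mem_flatMap.mp ha with ⟨l', hl', ha'⟩
        show decide (kf x < kf a) = true
        rw [hkey l' (by simp [hl']) a ha', hEq]
        exact decide_eq_true (hpair.1 l' hl')
      rw [List.flatMap_cons, pv_insertBy_append_not _ _ _ _ hfalse,
          pv_insertBy_all_before _ _ _ htrue, List.flatMap_cons]
      have hrest : ks'.flatMap (fun l => F l ++ if kf x == l then [x] else []) = ks'.flatMap F := by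
        apply List.flatMap_congr
        intro l' hl'
        have : (kf x == l') = false := by
          have := hpair.1 l' hl'
          simp [hEq]
          exact ne_of_lt this
        simp [this]
      rw [hrest]
      simp [hEq]
    · have hmem' : kf x ∈ ks' := by
        rcases List.mem_cons.mp hmem with h1 | h1
        · exact absurd h1 hNe
        · exact h1
      have hlt : l < kf x := hpair.1 _ hmem'
      have hfalse : ∀ a ∈ F l, (fun a b => decide (kf a < kf b)) x a = false := by
        intro a ha
        show decide (kf x < kf a) = false
        rw [hkey l (by simp) a ha]
        exact decide_eq_false (not_lt.mpr (le_of_lt hlt))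
      rw [List.flatMap_cons, pv_insertBy_append_not _ _ _ _ hfalse,
          ih hpair.2 hmem' (fun l hl => hne l (by simp [hl])) (fun l hl => hkey l (by simp [hl])),
          List.flatMap_cons]
      have : (kf x == l) = false := by simp [hNe]
      simp [this]

theorem pv_insertBy_flatMap_notmem {α : Type} (kf : α → String) (x : α) (ks : List String)
    (F : String → List α) (hks : ks.Pairwise (· < ·)) (hnm : kf x ∉ ks)
    (hne : ∀ l ∈ ks, F l ≠ []) (hkey : ∀ l ∈ ks, ∀ c ∈ F l, kf c = l)
    (hFk : F (kf x) = []) :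
    PySem.List.insertBy (fun a b => decide (kf a < kf b)) x (ks.flatMap F)
      = (PySem.List.insertBy (fun a b => decide (a < b)) (kf x) ks).flatMap
          (fun l => F l ++ if kf x == l then [x] else []) := by
  induction ks with
  | nil => simp [PySem.List.insertBy, hFk]
  | cons l ks' ih =>
    have hpair := (List.pairwise_cons.mp hks)
    have hNe : kf x ≠ l := fun h => hnm (by simp [h])
    rcases lt_or_gt_of_ne hNe with hlt | hgt
    · -- kf x < l : x goes first, key inserted first
      have htrue : ∀ a ∈ (l :: ks').flatMap F, (fun a b => decide (kf a < kf b)) x a = true := by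
        intro a ha
        rcases List.mem_flatMap.mp ha with ⟨l', hl', ha'⟩
        show decide (kf x < kf a) = true
        rw [hkey l' hl' a ha']
        rcases List.mem_cons.mp hl' with h1 | h1
        · exact decide_eq_true (h1 ▸ hlt)
        · exact decide_eq_true (lt_trans hlt (hpair.1 l' h1))
      rw [pv_insertBy_all_before _ _ _ htrue]
      have : PySem.List.insertBy (fun a b => decide (a < b)) (kf x) (l :: ks') = kf x :: l :: ks' := by
        simp [PySem.List.insertBy, hlt]
      rw [this, List.flatMap_cons (x := kf x), hFk]
      simp only [List.nil_append, beq_self_eq_true, if_true]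
      have hrest : (l :: ks').flatMap (fun l => F l ++ if kf x == l then [x] else [])
          = (l :: ks').flatMap F := by
        apply List.flatMap_congr
        intro l' hl'
        have : (kf x == l') = false := by
          apply beq_eq_false_iff_ne.mpr
          intro h; exact hnm (h ▸ hl')
        simp [this]
      rw [hrest]
      simp
    · have hfalse : ∀ a ∈ F l, (fun a b => decide (kf a < kf b)) x a = false := by
        intro a ha
        show decide (kf x < kf a) = false
        rw [hkey l (by simp) a ha]
        exact decide_eq_false (not_lt.mpr (le_of_lt hgt))
      have hins : PySem.List.insertBy (fun a b => decide (a < b)) (kf x) (l :: ks')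
          = l :: PySem.List.insertBy (fun a b => decide (a < b)) (kf x) ks' := by
        simp [PySem.List.insertBy, not_lt.mpr (le_of_lt hgt)]
      rw [List.flatMap_cons, pv_insertBy_append_not _ _ _ _ hfalse,
          ih hpair.2 (fun h => hnm (by simp [h])) (fun l hl => hne l (by simp [hl]))
            (fun l hl => hkey l (by simp [hl])),
          hins, List.flatMap_cons]
      have : (kf x == l) = false := beq_eq_false_iff_ne.mpr hNe
      simp [this]

theorem pv_ofList_append_singleton {α : Type} [BEq α] [LawfulBEq α] (m : List α) (k : α) :
    PySem.Set.ofList (m ++ [k]) = if k ∈ m then PySem.Set.ofList m else PySem.Set.ofList m ++ [k] := by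
  have h1 : PySem.Set.ofList (m ++ [k]) = PySem.Set.add (PySem.Set.ofList m) k := by
    simp [PySem.Set.ofList, List.foldl_append]
  rw [h1]
  unfold PySem.Set.add
  by_cases hk : k ∈ m
  · simp [PySem.Set.mem_ofList, hk]
  · simp [PySem.Set.mem_ofList, hk]

theorem pv_sorted_append_singleton {α κ : Type} [LT κ] [DecidableLT κ] (xs : List α) (x : α) (key : α → κ) :
    PySem.List.sorted (xs ++ [x]) key
      = PySem.List.insertBy (fun a b => decide (key a < key b)) x (PySem.List.sorted xs key) := by
  rw [PySem.List.sorted_eq_foldl_insertBy, PySem.List.sorted_eq_foldl_insertBy, List.foldl_append]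
  rfl

theorem pv_sorted_decomp {α : Type} (kf : α → String) (oc : List α) :
    PySem.List.sorted oc kf
      = (PySem.List.sorted (PySem.List.dedup (oc.map kf)) (fun y => y)).flatMap
          (fun l => oc.filter (fun c => kf c == l)) := by
  induction oc using List.reverseRecOn with
  | nil => rfl
  | append_singleton L x ih =>
    have hks : (PySem.List.sorted (PySem.List.dedup (L.map kf)) (fun y => y)).Pairwise (· < ·) := by
      rw [PySem.List.dedup_eq_ofList]; exact PySem.List.sorted_ofList_pairwise_lt _
    have hmemks : ∀ l, l ∈ PySem.List.sorted (PySem.List.dedup (L.map kf)) (fun y => y) ↔ l ∈ L.map kf := by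
      intro l
      rw [PySem.List.mem_sorted, PySem.List.dedup_eq_ofList, PySem.Set.mem_ofList]
    have hne : ∀ l ∈ PySem.List.sorted (PySem.List.dedup (L.map kf)) (fun y => y),
        L.filter (fun c => kf c == l) ≠ [] := by
      intro l hl
      rcases List.mem_map.mp ((hmemks l).mp hl) with ⟨c, hc, hkc⟩
      intro hemp
      have : c ∈ L.filter (fun c => kf c == l) := List.mem_filter.mpr ⟨hc, by simp [hkc]⟩
      simp [hemp] at this
    have hkey : ∀ l ∈ PySem.List.sorted (PySem.List.dedup (L.map kf)) (fun y => y),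
        ∀ c ∈ L.filter (fun c => kf c == l), kf c = l := by
      intro l _ c hc
      simpa using (List.mem_filter.mp hc).2
    have hfilters : ∀ l, (L ++ [x]).filter (fun c => kf c == l)
        = L.filter (fun c => kf c == l) ++ if kf x == l then [x] else [] := by
      intro l
      rw [List.filter_append]
      congr 1
      cases h : (kf x == l) <;> simp [h]
    rw [pv_sorted_append_singleton, ih]
    by_cases hm : kf x ∈ L.map kf
    · rw [pv_insertBy_flatMap_mem kf x _ _ hks ((hmemks _).mpr hm) hne hkey]
      have hkeq : PySem.List.dedup ((L ++ [x]).map kf) = PySem.List.dedup (L.map kf) := by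
        simp only [PySem.List.dedup_eq_ofList, List.map_append, List.map_cons, List.map_nil]
        rw [pv_ofList_append_singleton]
        simp [hm]
      rw [hkeq]
      exact (List.flatMap_congr (fun l _ => hfilters l)).symm
    · have hFk : L.filter (fun c => kf c == kf x) = [] := by
        rw [List.filter_eq_nil_iff]
        intro c hc
        simp only [beq_iff_eq]
        intro h
        exact hm (List.mem_map.mpr ⟨c, hc, h⟩)
      rw [pv_insertBy_flatMap_notmem kf x _ _ hks (fun h => hm ((hmemks _).mp h)) hne hkey hFk]
      have hkeq : PySem.List.dedup ((L ++ [x]).map kf) = PySem.List.dedup (L.map kf) ++ [kf x] := by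
        simp only [PySem.List.dedup_eq_ofList, List.map_append, List.map_cons, List.map_nil]
        rw [pv_ofList_append_singleton]
        simp [hm]
      rw [hkeq, pv_sorted_append_singleton]
      exact (List.flatMap_congr (fun l _ => hfilters l)).symm

theorem pv_dict_items_eq {κ ν : Type} [BEq κ] [LawfulBEq κ] (l : List (κ × ν)) (dflt : ν)
    (h : (l.map Prod.fst).Nodup) :
    l = (l.map Prod.fst).map (fun k => (k, (PySem.Dict.mk l).getD k dflt)) := by
  induction l with
  | nil => rfl
  | cons p t ih =>
    obtain ⟨k, v⟩ := p
    simp only [List.map_cons, List.nodup_cons] at h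
    simp only [List.map_cons]
    have hhead : (PySem.Dict.mk ((k, v) :: t)).getD k dflt = v := by
      simp [PySem.Dict.getD, PySem.Dict.get?_mk_cons]
    rw [hhead]
    congr 1
    have ht := ih h.2
    conv_lhs => rw [ht]
    apply List.map_congr_left
    intro k' hk'
    have hne : (k == k') = false := by
      apply beq_eq_false_iff_ne.mpr
      intro he
      exact h.1 (he ▸ hk')
    simp [PySem.Dict.getD, PySem.Dict.get?_mk_cons, hne]

theorem pv_grouped_items (oc : List (List (String × String))) :
    (oc.foldl (fun d cell => d.modify (pvKf cell) [] (fun v => v ++ [cell]))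
        (PySem.Dict.empty : PySem.Dict String (List (List (String × String))))).items
      = (PySem.List.dedup (oc.map pvKf)).map (fun l => (l, pvF oc l)) := by
  set d := oc.foldl (fun d cell => d.modify (pvKf cell) [] (fun v => v ++ [cell]))
        (PySem.Dict.empty : PySem.Dict String (List (List (String × String)))) with hd
  have hkeys : d.keys = PySem.List.dedup (oc.map pvKf) := by
    rw [hd]
    rw [PySem.Dict.keys_foldl_modify_key oc pvKf [] (fun _ cell v => v ++ [cell]) PySem.Dict.empty]
    rw [PySem.List.dedup_eq_ofList]
    rfl
  have hnodup : d.keys.Nodup := by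
    rw [hkeys, PySem.List.dedup_eq_ofList]
    exact PySem.Set.nodup_ofList _
  have hgetD : ∀ l, d.getD l [] = pvF oc l := by
    intro l
    have : d = (oc.map (fun c => (pvKf c, c))).foldl
        (fun d p => d.modify p.1 [] (fun v => v ++ [p.2])) PySem.Dict.empty := by
      rw [hd, List.foldl_map]
    rw [this, PySem.Dict.getD_foldl_modify_append]
    simp [PySem.Dict.empty, PySem.Dict.getD, PySem.Dict.get?, pvF, List.filter_map, Function.comp_def, List.map_map]
  have := pv_dict_items_eq d.items [] (by exact hnodup)
  calc d.items = (d.items.map Prod.fst).map (fun k => (k, (PySem.Dict.mk d.items).getD k [])) := this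
    _ = (PySem.List.dedup (oc.map pvKf)).map (fun l => (l, pvF oc l)) := by
        have : d.items.map Prod.fst = d.keys := rfl
        rw [this, hkeys]
        apply List.map_congr_left
        intro k _
        have : PySem.Dict.mk d.items = d := rfl
        rw [this, hgetD]

theorem pv_sorted_pairs (oc : List (List (String × String))) :
    PySem.List.sorted ((PySem.List.dedup (oc.map pvKf)).map (fun l => (l, pvF oc l))) (fun p => p.1)
      = (pvKs oc).map (fun l => (l, pvF oc l)) := by
  apply PySem.List.sorted_eq_of_perm_of_pairwise_lt
  · exact (PySem.List.sorted_perm _ _ _).map _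
  · have hp : (pvKs oc).Pairwise (· < ·) := by
      unfold pvKs
      rw [PySem.List.dedup_eq_ofList]
      exact PySem.List.sorted_ofList_pairwise_lt _
    exact List.Pairwise.map _ (fun a b h => h) hp

theorem pv_getLastD_mem {α : Type} (r : List α) (d : α) (h : r ≠ []) : r.getLastD d ∈ r := by
  cases r with
  | nil => exact absurd rfl h
  | cons a t =>
    rw [List.getLastD_eq_getLast?, List.getLast?_eq_some_getLast (l := a::t) (by simp)]
    simp

theorem pv_foldB_run (ch l : String) (cells : List (List (String × String))) :
    ∀ (r : List (List (String × String))) (out : List String),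
    (∀ c ∈ cells, pvKf c = l) → (∀ c ∈ r, pvKf c = l) →
    List.foldl (pvStepB ch) (out, r) cells = (out, r ++ cells) := by
  induction cells with
  | nil => intro r out _ _; simp
  | cons c cs ih =>
    intro r out hc hr
    have hstep : pvStepB ch (out, r) c = (out, r ++ [c]) := by
      unfold pvStepB
      rcases eq_or_ne r [] with hre | hre
      · simp [hre]
      · have : pvCellGet (r.getLastD []) "lens" = pvCellGet c "lens" := by
          have h1 := hr _ (pv_getLastD_mem r [] hre)
          have h2 := hc c (by simp)
          unfold pvKf at h1 h2
          rw [h1, h2]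
        rw [List.getLastD_eq_getLast?] at this
        simp [this]
    rw [List.foldl_cons, hstep]
    simpa [List.append_assoc] using ih (r ++ [c]) out (fun c hcc => hc c (by simp [hcc]))
      (by intro a ha
          rcases List.mem_append.mp ha with h1 | h1
          · exact hr a h1
          · simp at h1; exact h1 ▸ hc c (by simp))

theorem pv_foldB_main (ch : String) (ks : List String) (F : String → List (List (String × String)))
    (hks : ks.Pairwise (· < ·)) (hne : ∀ l ∈ ks, F l ≠ [])
    (hkey : ∀ l ∈ ks, ∀ c ∈ F l, pvKf c = l) :
    ∀ (out : List String) (r : List (List (String × String))) (l0 : String),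
      (∀ c ∈ r, pvKf c = l0) → (r ≠ [] → ∀ l ∈ ks, l0 < l) →
      (let st := List.foldl (pvStepB ch) (out, r) (ks.flatMap F)
       if st.2.isEmpty then st.1 else st.1 ++ [pvLineRun st.2 ch])
        = out ++ (if r.isEmpty then [] else [pvLineRun r ch])
            ++ ks.map (fun l => pvLine l (F l) ch) := by
  induction ks with
  | nil =>
    intro out r l0 hr hlt
    rcases eq_or_ne r [] with hre | hre <;> simp [hre]
  | cons l ks' ih =>
    intro out r l0 hr hlt
    have hpair := List.pairwise_cons.mp hks
    obtain ⟨c, cs, hFl⟩ : ∃ c cs, F l = c :: cs := by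
      rcases hF : F l with _ | ⟨c, cs⟩
      · exact absurd hF (hne l (by simp))
      · exact ⟨c, cs, rfl⟩
    have hkeyl : ∀ a ∈ F l, pvKf a = l := hkey l (by simp)
    have hLineFl : pvLineRun (F l) ch = pvLine l (F l) ch := by
      unfold pvLineRun
      have : pvCellGet ((F l).headD []) "lens" = l := by
        have := hkeyl ((F l).headD []) (by rw [hFl]; simp)
        exact this
      rw [this]
    simp only [List.flatMap_cons]
    rw [List.foldl_append]
    have hfirst : List.foldl (pvStepB ch) (out, r) (F l)
        = (out ++ (if r.isEmpty then [] else [pvLineRun r ch]), F l) := by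
      rcases eq_or_ne r [] with hre | hre
      · subst hre
        have := pv_foldB_run ch l (F l) [] out hkeyl (by simp)
        simpa using this
      · have hstep : pvStepB ch (out, r) c = (out ++ [pvLineRun r ch], [c]) := by
          unfold pvStepB
          have hrl : pvCellGet (r.getLastD []) "lens" = l0 := hr _ (pv_getLastD_mem r [] hre)
          have hcl : pvCellGet c "lens" = l := hkeyl c (by rw [hFl]; simp)
          have : pvCellGet (r.getLastD []) "lens" ≠ pvCellGet c "lens" := by
            rw [hrl, hcl]
            exact ne_of_lt (hlt hre l (by simp))
          rw [List.getLastD_eq_getLast?] at this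
          simp [hre, this]
        rw [hFl, List.foldl_cons, hstep]
        have := pv_foldB_run ch l cs [c] (out ++ [pvLineRun r ch])
          (fun a ha => hkeyl a (by rw [hFl]; simp [ha])) (by intro a ha; simp at ha; exact ha ▸ hkeyl c (by rw [hFl]; simp))
        rw [this]
        simp [hre]
    rw [hfirst]
    have hrec := ih hpair.2 (fun l' hl' => hne l' (by simp [hl'])) (fun l' hl' => hkey l' (by simp [hl']))
      (out ++ (if r.isEmpty then [] else [pvLineRun r ch])) (F l) l hkeyl
      (fun _ => fun l' hl' => hpair.1 l' hl')
    simp only at hrec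
    rw [hrec]
    have : (F l).isEmpty = false := by rw [hFl]; rfl
    simp [this, hLineFl]


theorem pv_main_eq (oc dg : List (List (String × String))) (ch : String) :
    witness_obligations oc dg ch = witness_obligations_alt oc dg ch := by
  have hpt : ∀ c : List (String × String), pvCellGet c "lens" = pvKf c := fun _ => rfl
  have hmemks : ∀ l, l ∈ pvKs oc ↔ l ∈ oc.map pvKf := by
    intro l; unfold pvKs
    rw [PySem.List.mem_sorted, PySem.List.dedup_eq_ofList, PySem.Set.mem_ofList]
  have hks : (pvKs oc).Pairwise (· < ·) := by
    unfold pvKs; rw [PySem.List.dedup_eq_ofList]; exact PySem.List.sorted_ofList_pairwise_lt _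
  have hne : ∀ l ∈ pvKs oc, pvF oc l ≠ [] := by
    intro l hl
    rcases List.mem_map.mp ((hmemks l).mp hl) with ⟨c, hc, hkc⟩
    intro hemp
    have : c ∈ pvF oc l := List.mem_filter.mpr ⟨hc, by simp [hkc]⟩
    simp [hemp] at this
  have hkey : ∀ l ∈ pvKs oc, ∀ c ∈ pvF oc l, pvKf c = l := by
    intro l _ c hc; simpa using (List.mem_filter.mp hc).2
  have hA : PySem.List.sorted
        ((oc.foldl (fun d cell => d.modify (pvKf cell) [] (fun v => v ++ [cell]))
          (PySem.Dict.empty : PySem.Dict String (List (List (String × String))))).items) (fun p => p.1)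
      = (pvKs oc).map (fun l => (l, pvF oc l)) := by
    rw [pv_grouped_items, pv_sorted_pairs]
  have hB : PySem.List.sorted oc pvKf = (pvKs oc).flatMap (pvF oc) := pv_sorted_decomp pvKf oc
  have hmain := pv_foldB_main ch (pvKs oc) (pvF oc) hks hne hkey
      (if dg.isEmpty then [] else [pvDupMsg]) [] "" (by simp) (fun h => absurd rfl h)
  simp only at hmain
  unfold witness_obligations witness_obligations_alt
  simp only [hpt]
  rw [hA, hB, List.map_map]
  simp only [Function.comp_def]
  rw [hmain]
  simp

-- ===== VERDICT (by name: the statement is the Claim_ definition above) =====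
theorem witness_obligations_spec : Claim_equal_witness_obligations := by
  intro oc dg ch _ _
  unfold Spec_witness_obligations
  exact pv_main_eq oc dg ch
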